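-- pv_equiv track=rewrite | github.com/Steven-Acomb/EquivalentResistorLeetcode | solutions/equivalent-resistance/python/config_explorer.py | count_topologies
-- ===== SOURCE A (Python) =====
-- def count_topologies(max_resistors):
--     """
--     Count the number of distinct SERIES-PARALLEL circuit topologies (tree shape
--     × operator assignment) for exactly n identical resistors.
--
--     A topology here is a full binary tree with n leaves, where each internal
--     node is labeled series or parallel. Two topologies that differ only by
--     swapping the children of a commutative operator are counted separately
--     (making this an upper bound on structurally distinct series-parallel
--     topologies).
--
--     This does NOT count non-series-parallel topologies (bridges, etc.) which
--     are not representable as binary trees. Enumerating those requires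
--     enumerating 2-connected graphs — a harder graph theory problem.
--     """
--     # topo[n] = number of distinct topologies with exactly n resistors
--     topo = {1: 1}
--     for n in range(2, max_resistors + 1):
--         count = 0
--         for k in range(1, n):
--             j = n - k
--             # Each pair of sub-topologies can be combined 2 ways (series/parallel)
--             count += topo[k] * topo[j] * 2
--         topo[n] = count
--     return topo
-- ===== SOURCE B (Python) =====
-- def count_topologies(max_resistors):
--     # Build the value sequence first (a[n] = Catalan(n-1)*2^(n-1) via the
--     # multiplicative Catalan recurrence), then assemble the dict in one shot.
--     vals = [1]
--     while len(vals) < max_resistors: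
--         n = len(vals) + 1
--         vals.append(vals[-1] * 4 * (2 * n - 3) // n)
--     return {i + 1: a for i, a in enumerate(vals)}
-- ===== Notes on version B (the rewrite author's own statement) =====
-- stated objective: faster
-- what changed: Replaces A's O(n^2) convolution DP over a growing dict by a two-stage construction: a plain list of values grown by the multiplicative Catalan recurrence a[n]=a[n-1]*4*(2n-3)//n (closed form Catalan(n-1)*2^(n-1)), then a dict comprehension over enumerate(vals).
import Mathlib
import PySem

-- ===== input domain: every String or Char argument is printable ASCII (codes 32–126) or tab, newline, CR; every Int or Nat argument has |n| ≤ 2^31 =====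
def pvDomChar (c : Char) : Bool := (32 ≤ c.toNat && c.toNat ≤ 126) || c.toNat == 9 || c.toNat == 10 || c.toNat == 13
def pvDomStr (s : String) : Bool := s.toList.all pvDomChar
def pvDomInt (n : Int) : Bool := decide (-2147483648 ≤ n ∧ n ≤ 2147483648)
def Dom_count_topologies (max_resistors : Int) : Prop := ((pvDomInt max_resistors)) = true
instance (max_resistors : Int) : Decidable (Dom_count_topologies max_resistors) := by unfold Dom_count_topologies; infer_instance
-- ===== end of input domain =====

-- B replaces A's O(n^2)-multiplication convolution DP over a growing dict by a list of values
-- grown via the multiplicative Catalan recurrence, assembled into the dict at the end (objective: faster).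

-- ===== PORT A =====
-- one iteration of A's outer loop; topo[k] is always present when read, ported as getD _ 0
def topoStep (topo : PySem.Dict Int Int) (n : Int) : PySem.Dict Int Int :=
  let count := (PySem.List.pyRange 1 n 1).foldl
    (fun count k =>
      let j := n - k
      count + topo.getD k 0 * topo.getD j 0 * 2) 0
  topo.insert n count

def count_topologies (max_resistors : Int) : List (Int × Int) :=
  ((PySem.List.pyRange 2 (max_resistors + 1) 1).foldl topoStep
    (PySem.Dict.ofList [((1 : Int), (1 : Int))])).items

-- ===== PORT B =====
-- B's while loop: runs while len(vals) < max_resistors; each iteration appends one element,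
-- so the fuel (max_resistors - 1).toNat is exactly the number of iterations
def valsLoop : Nat → List Int → List Int
  | 0, vals => vals
  | fuel + 1, vals =>
      let n : Int := (vals.length : Int) + 1
      -- vals[-1]: vals is never empty, ported as pyGet? … (-1) with default 0
      valsLoop fuel (vals ++ [PySem.Int.floordiv ((PySem.List.pyGet? vals (-1)).getD 0 * 4 * (2 * n - 3)) n])

def count_topologies_alt (max_resistors : Int) : List (Int × Int) :=
  -- vals := valsLoop …; then the dict comprehension {i + 1: a for i, a in enumerate(vals)}:
  -- successive inserts into an empty dict (vals inlined)
  ((PySem.List.enumerate (valsLoop (max_resistors - 1).toNat [1]) 0).foldl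
    (fun d p => d.insert (p.1 + 1) p.2) PySem.Dict.empty).items

-- ===== PRECONDITION & SPEC =====
def Spec_count_topologies (max_resistors : Int) (out : List (Int × Int)) : Prop := out = count_topologies_alt max_resistors
instance (max_resistors : Int) (out : List (Int × Int)) : Decidable (Spec_count_topologies max_resistors out) := by unfold Spec_count_topologies; infer_instance

-- ===== CLAIM (what is proved, stated in full; the proofs are below) =====
def Claim_equal_count_topologies : Prop := ∀ (max_resistors : Int), Dom_count_topologies max_resistors → Spec_count_topologies max_resistors (count_topologies max_resistors)

-- ===== LEMMAS AND PROOFS =====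

-- the common value: topo[n] = Catalan(n-1) * 2^(n-1)
def gNat (n : Nat) : Nat := catalan (n - 1) * 2 ^ (n - 1)

def gI (n : Nat) : Int := (gNat n : Int)

theorem gI_one : gI 1 = 1 := by simp [gI, gNat]

-- the dict after t iterations of A's loop: keys 1 .. t+1
def Edict : Nat → PySem.Dict Int Int
  | 0 => PySem.Dict.ofList [((1 : Int), (1 : Int))]
  | t + 1 => (Edict t).insert ((t : Int) + 2) (gI (t + 2))

-- the items list both programs produce for t+1 resistors
def Rlist (t : Nat) : List (Int × Int) := (List.range (t + 1)).map (fun i : Nat => ((i : Int) + 1, gI (i + 1)))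

-- the value list B's while loop produces
def vlist (t : Nat) : List Int := (List.range (t + 1)).map (fun i => gI (i + 1))

-- Catalan multiplicative recurrence, from the centralBinom lemmas
theorem cat_mul (m : Nat) : (m + 2) * catalan (m + 1) = 2 * (2 * m + 1) * catalan m := by
  have h1 := succ_mul_catalan_eq_centralBinom (m + 1)
  have h2 := succ_mul_catalan_eq_centralBinom m
  have h3 := Nat.succ_mul_centralBinom_succ m
  apply Nat.eq_of_mul_eq_mul_left (show 0 < m + 1 by omega)
  calc (m + 1) * ((m + 2) * catalan (m + 1))
      = (m + 1 + 1) * catalan (m + 1) * (m + 1) := by ring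
    _ = (m + 1) * Nat.centralBinom (m + 1) := by rw [h1]; ring
    _ = 2 * (2 * m + 1) * Nat.centralBinom m := h3
    _ = 2 * (2 * m + 1) * ((m + 1) * catalan m) := by rw [h2]
    _ = (m + 1) * (2 * (2 * m + 1) * catalan m) := by ring

theorem gNat_mul (t : Nat) : gNat (t + 1) * 4 * (2 * t + 1) = gNat (t + 2) * (t + 2) := by
  simp only [gNat, Nat.add_sub_cancel]
  have : t + 2 - 1 = t + 1 := by omega
  rw [this]
  calc catalan t * 2 ^ t * 4 * (2 * t + 1)
      = (2 * (2 * t + 1) * catalan t) * (2 ^ t * 2) := by ring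
    _ = ((t + 2) * catalan (t + 1)) * 2 ^ (t + 1) := by rw [← cat_mul t]; ring
    _ = catalan (t + 1) * 2 ^ (t + 1) * (t + 2) := by ring

-- the exact division both loops perform
theorem fdiv_g (t : Nat) :
    PySem.Int.floordiv (gI (t + 1) * 4 * (2 * ((t : Int) + 2) - 3)) ((t : Int) + 2) = gI (t + 2) := by
  have e1 : gI (t + 1) * 4 * (2 * ((t : Int) + 2) - 3)
      = ((gNat (t + 1) * 4 * (2 * t + 1) : Nat) : Int) := by
    simp only [gI]; push_cast; ring
  have e2 : ((t : Int) + 2) = ((t + 2 : Nat) : Int) := by push_cast; ring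
  rw [e1, e2, PySem.Int.floordiv_natCast]
  rw [gNat_mul t, Nat.mul_div_cancel _ (by omega : 0 < t + 2)]
  rfl

-- Catalan convolution: the inner sum of A
theorem gNat_sum (t : Nat) :
    ∑ i ∈ Finset.range (t + 1), gNat (1 + i) * gNat (t + 1 - i) * 2 = gNat (t + 2) := by
  have hc : catalan (t + 1) = ∑ i ∈ Finset.range (t + 1), catalan i * catalan (t - i) := by
    rw [catalan_succ]
    exact Fin.sum_univ_eq_sum_range (fun i => catalan i * catalan (t - i)) (t + 1)
  have : ∀ i ∈ Finset.range (t + 1),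
      gNat (1 + i) * gNat (t + 1 - i) * 2 = catalan i * catalan (t - i) * 2 ^ (t + 1) := by
    intro i hi
    rw [Finset.mem_range] at hi
    simp only [gNat]
    have h1 : 1 + i - 1 = i := by omega
    have h2 : t + 1 - i - 1 = t - i := by omega
    rw [h1, h2]
    have h3 : 2 ^ i * 2 ^ (t - i) * 2 = 2 ^ (t + 1) := by
      rw [← pow_add]
      have : i + (t - i) = t := by omega
      rw [this, pow_succ]
    calc catalan i * 2 ^ i * (catalan (t - i) * 2 ^ (t - i)) * 2
        = catalan i * catalan (t - i) * (2 ^ i * 2 ^ (t - i) * 2) := by ring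
      _ = catalan i * catalan (t - i) * 2 ^ (t + 1) := by rw [h3]
  rw [Finset.sum_congr rfl this, ← Finset.sum_mul, ← hc]
  have h : t + 2 - 1 = t + 1 := by omega
  simp only [gNat, h]

-- lookup in the invariant dict
theorem Edict_getD (t : Nat) : ∀ k : Nat, 1 ≤ k → k ≤ t + 1 →
    (Edict t).getD (k : Int) 0 = gI k := by
  induction t with
  | zero =>
    intro k h1 h2
    have : k = 1 := by omega
    subst this
    rw [gI_one]
    decide
  | succ t ih =>
    intro k h1 h2
    show ((Edict t).insert ((t : Int) + 2) (gI (t + 2))).getD (k : Int) 0 = gI k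
    by_cases hk : k = t + 2
    · subst hk
      have hcast : ((t + 2 : Nat) : Int) = (t : Int) + 2 := by push_cast; ring
      rw [hcast, PySem.Dict.getD_insert_self]
    · have hne : (k : Int) ≠ (t : Int) + 2 := by
        intro h; apply hk; omega
      rw [PySem.Dict.getD_insert_of_ne _ _ _ hne]
      exact ih k h1 (by omega)

-- one A-step on the invariant dict
theorem stepA_Edict (t : Nat) : topoStep (Edict t) ((t : Int) + 2) = Edict (t + 1) := by
  show (Edict t).insert ((t : Int) + 2) _ = (Edict t).insert ((t : Int) + 2) (gI (t + 2))
  congr 1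
  have hfun : (fun (count k : Int) =>
      let j := (t : Int) + 2 - k
      count + (Edict t).getD k 0 * (Edict t).getD j 0 * 2)
      = (fun (count k : Int) =>
        count + (Edict t).getD k 0 * (Edict t).getD ((t : Int) + 2 - k) 0 * 2) := rfl
  rw [hfun]
  rw [PySem.List.foldl_add (PySem.List.pyRange 1 ((t : Int) + 2) 1)
    (fun k => (Edict t).getD k 0 * (Edict t).getD ((t : Int) + 2 - k) 0 * 2) 0]
  rw [PySem.List.pyRange_one]
  have htn : ((t : Int) + 2 - 1).toNat = t + 1 := by omega
  rw [htn, List.map_map]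
  have hmap : ∀ i ∈ List.range (t + 1),
      ((fun k => (Edict t).getD k 0 * (Edict t).getD ((t : Int) + 2 - k) 0 * 2) ∘
        (fun k : Nat => (1 : Int) + k)) i = (↑(gNat (1 + i) * gNat (t + 1 - i) * 2) : Int) := by
    intro i hi
    rw [List.mem_range] at hi
    simp only [Function.comp]
    have e1 : ((1 : Int) + (i : Nat)) = ((1 + i : Nat) : Int) := by push_cast; ring
    have e2 : ((t : Int) + 2 - ((1 + i : Nat) : Int)) = ((t + 1 - i : Nat) : Int) := by
      push_cast [Nat.cast_sub (by omega : i ≤ t + 1)]; ring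
    rw [e1, e2, Edict_getD t (1 + i) (by omega) (by omega),
      Edict_getD t (t + 1 - i) (by omega) (by omega)]
    simp only [gI]
    push_cast
    ring
  rw [List.map_congr_left hmap]
  have hsum : (List.range (t + 1)).map (fun i => (↑(gNat (1 + i) * gNat (t + 1 - i) * 2) : Int))
      = ((List.range (t + 1)).map (fun i => gNat (1 + i) * gNat (t + 1 - i) * 2)).map
          (fun n : Nat => (n : Int)) := by
    rw [List.map_map]; rfl
  rw [hsum, ← Nat.cast_list_sum]
  have hconv : ((List.range (t + 1)).map (fun i => gNat (1 + i) * gNat (t + 1 - i) * 2)).sum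
      = ∑ i ∈ Finset.range (t + 1), gNat (1 + i) * gNat (t + 1 - i) * 2 := rfl
  rw [hconv, gNat_sum]
  simp [gI]

-- A's fold maintains the invariant
theorem foldA_Edict (t : Nat) :
    (PySem.List.pyRange 2 ((t : Int) + 2) 1).foldl topoStep (Edict 0) = Edict t := by
  induction t with
  | zero => rw [PySem.List.pyRange_one_eq_nil (by omega)]; rfl
  | succ t ih =>
    have hsplit : PySem.List.pyRange 2 (((t + 1 : Nat) : Int) + 2) 1
        = PySem.List.pyRange 2 ((t : Int) + 2) 1 ++ [(t : Int) + 2] := by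
      have : (((t + 1 : Nat) : Int) + 2) = ((t : Int) + 2) + 1 := by push_cast; ring
      rw [this, PySem.List.pyRange_one_succ_right (by omega)]
    rw [hsplit, List.foldl_append, ih]
    simp only [List.foldl_cons, List.foldl_nil]
    exact stepA_Edict t

-- vlist grows by one element on the right
theorem vlist_succ (t : Nat) : vlist (t + 1) = vlist t ++ [gI (t + 2)] := by
  simp [vlist, List.range_succ]

-- B's while loop computes the value list
theorem valsLoop_vlist (t : Nat) : ∀ s : Nat, valsLoop t (vlist s) = vlist (s + t) := by
  induction t with
  | zero => intro s; rfl
  | succ t ih =>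
    intro s
    show valsLoop t (vlist s ++ [_]) = _
    have hlast : (PySem.List.pyGet? (vlist s) (-1)).getD 0 = gI (s + 1) := by
      cases s with
      | zero => rfl
      | succ u => rw [vlist_succ, PySem.List.pyGet?_neg_one_append_singleton]; rfl
    have hlen : ((vlist s).length : Int) + 1 = (s : Int) + 2 := by
      simp [vlist]; ring
    rw [hlast, hlen, fdiv_g s, ← vlist_succ s, ih (s + 1)]
    congr 1
    omega

-- the items of A's invariant dict
theorem Rlist_succ (t : Nat) : Rlist (t + 1) = Rlist t ++ [((t : Int) + 2, gI (t + 2))] := by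
  simp only [Rlist, List.range_succ, List.map_append, List.map_cons, List.map_nil]
  congr 2

theorem Edict_items (t : Nat) : (Edict t).items = Rlist t := by
  induction t with
  | zero => simp [Edict, Rlist, gI_one]; rfl
  | succ t ih =>
    have hkeys : (Edict t).keys = (List.range (t + 1)).map (fun i : Nat => (i : Int) + 1) := by
      show (Edict t).items.map (·.1) = _
      rw [ih]
      simp [Rlist, List.map_map, Function.comp]
    have hnc : (Edict t).contains ((t : Int) + 2) = false := by
      rw [PySem.Dict.contains_eq_decide_mem_keys, hkeys]
      simp only [decide_eq_false_iff_not, List.mem_map]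
      rintro ⟨i, hi, h⟩
      rw [List.mem_range] at hi
      omega
    show ((Edict t).insert ((t : Int) + 2) (gI (t + 2))).items = _
    rw [PySem.Dict.items_insert_of_not_contains _ _ hnc, ih, Rlist_succ]

-- assembling the dict comprehension from the value list
theorem comprehension_items (t : Nat) :
    ((PySem.List.enumerate (vlist t) 0).foldl (fun d p => d.insert (p.1 + 1) p.2)
      PySem.Dict.empty).items = Rlist t := by
  have hfresh : ∀ p ∈ PySem.List.enumerate (vlist t) 0,
      (PySem.Dict.empty : PySem.Dict Int Int).contains (p.1 + 1) = false := by
    intro p _; exact PySem.Dict.contains_empty _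
  have hnd : ((PySem.List.enumerate (vlist t) 0).map (fun p => p.1 + 1)).Nodup := by
    have hmm : ((PySem.List.enumerate (vlist t) 0).map (fun p => p.1 + 1))
        = ((PySem.List.enumerate (vlist t) 0).map (·.1)).map (· + 1) := by
      rw [List.map_map]; rfl
    rw [hmm, PySem.List.map_fst_enumerate]
    simp only [zero_add]
    rw [PySem.List.pyRange_zero_natCast, List.map_map]
    exact (List.nodup_range).map (fun a b h => by
      simp only [Function.comp] at h; omega)
  rw [PySem.Dict.items_foldl_insert_fresh _ _ _ _ hfresh hnd]
  have hemp : (PySem.Dict.empty : PySem.Dict Int Int).items = [] := rfl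
  rw [hemp, List.nil_append]
  apply List.ext_getElem
  · simp [Rlist, vlist, PySem.List.length_enumerate]
  · intro k h1 h2
    have hk : k < (vlist t).length := by
      simpa [PySem.List.length_enumerate] using h1
    have hkt : k < t + 1 := by simpa [vlist] using hk
    rw [List.getElem_map, PySem.List.getElem_enumerate]
    simp only [Rlist, List.getElem_map, List.getElem_range, vlist]
    refine Prod.ext ?_ ?_
    · simp
    · simp

-- ===== VERDICT (by name: the statement is the Claim_ definition above) =====
theorem count_topologies_spec : Claim_equal_count_topologies := by
  intro m _
  show count_topologies m = count_topologies_alt m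
  unfold count_topologies count_topologies_alt
  by_cases hm : m ≤ 1
  · rw [PySem.List.pyRange_one_eq_nil (by omega), Int.toNat_of_nonpos (by omega)]
    rfl
  · have h2 : 2 ≤ m := by omega
    set t : Nat := (m - 2).toNat with ht
    have hmt : m + 1 = ((t + 1 : Nat) : Int) + 2 := by push_cast; omega
    have hfuel : (m - 1).toNat = t + 1 := by omega
    rw [hmt, hfuel]
    have hE0 : PySem.Dict.ofList [((1 : Int), (1 : Int))] = Edict 0 := rfl
    rw [hE0, foldA_Edict (t + 1), Edict_items]
    have h1v : ([(1 : Int)] : List Int) = vlist 0 := by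
      show _ = [gI 1]; rw [gI_one]
    rw [h1v, valsLoop_vlist (t + 1) 0, Nat.zero_add]
    exact (comprehension_items (t + 1)).symm
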